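-- pv_equiv track=rewrite | github.com/Yinghao-Li/CHMM-ALT | Src/DataAssist.py | label_to_span
-- ===== SOURCE A (Python) =====
-- from typing import List, Dict, Tuple, Optional, Any
--
-- def label_to_span(labels: List[str],
--                   scheme: Optional[str] = 'BIO') -> dict:
--     """
--     convert labels to spans
--     :param labels: a list of labels
--     :param scheme: labeling scheme, in ['BIO', 'BILOU'].
--     :return: labeled spans, a list of tuples (start_idx, end_idx, label)
--     """
--     assert scheme in ['BIO', 'BILOU'], ValueError("unknown labeling scheme")
--
--     labeled_spans = dict()
--     i = 0
--     while i < len(labels):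
--         if labels[i] == 'O':
--             i += 1
--             continue
--         else:
--             if scheme == 'BIO':
--                 if labels[i][0] == 'B':
--                     start = i
--                     lb = labels[i][2:]
--                     i += 1
--                     try:
--                         while labels[i][0] == 'I':
--                             i += 1
--                         end = i
--                         labeled_spans[(start, end)] = lb
--                     except IndexError:
--                         end = i
--                         labeled_spans[(start, end)] = lb
--                         i += 1
--                 # this should not happen
--                 elif labels[i][0] == 'I':
--                     i += 1
--             elif scheme == 'BILOU':
--                 if labels[i][0] == 'U':
--                     start = i
--                     end = i + 1
--                     lb = labels[i][2:]
--                     labeled_spans[(start, end)] = lb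
--                     i += 1
--                 elif labels[i][0] == 'B':
--                     start = i
--                     lb = labels[i][2:]
--                     i += 1
--                     try:
--                         while labels[i][0] != 'L':
--                             i += 1
--                         end = i
--                         labeled_spans[(start, end)] = lb
--                     except IndexError:
--                         end = i
--                         labeled_spans[(start, end)] = lb
--                         break
--                     i += 1
--                 else:
--                     i += 1
--
--     return labeled_spans
-- ===== SOURCE B (Python) =====
-- def label_to_span(labels, scheme='BIO'):
--     """Single flat pass with explicit in-span state instead of nested index-jumping loops."""
--     assert scheme in ['BIO', 'BILOU'], ValueError("unknown labeling scheme")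
--     spans = {}
--     in_span = False
--     start = 0
--     lb = ''
--     if scheme == 'BIO':
--         for i, tag in enumerate(labels):
--             c = tag[:1]
--             if in_span and c != 'I':
--                 spans[(start, i)] = lb
--             if c == 'B':
--                 in_span = True
--                 start = i
--                 lb = tag[2:]
--             else:
--                 in_span = in_span and c == 'I'
--     else:
--         for i, tag in enumerate(labels):
--             c = tag[:1]
--             if in_span:
--                 if c == 'L':
--                     spans[(start, i)] = lb
--                     in_span = False
--                 continue
--             if c == 'U':
--                 spans[(i, i + 1)] = tag[2:]
--             elif c == 'B':
--                 in_span = True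
--                 start = i
--                 lb = tag[2:]
--     if in_span:
--         spans[(start, len(labels))] = lb
--     return spans
-- ===== Notes on version B (the rewrite author's own statement) =====
-- stated objective: simpler
-- what changed: Replaces A's nested while-loops with try/except index jumping by one flat for-loop over enumerate(labels) that keeps explicit state (in_span, start, lb) and closes spans at boundaries, plus a single trailing close.
-- outside the precondition, e.g. on label_to_span(['B-x', ''], 'BILOU'): A returns {(0, 1): 'x'}, B returns {(0, 2): 'x'}; on label_to_span(['B-x', ''], 'BIO'): A returns {(0, 1): 'x'}, B returns {(0, 1): 'x'}
import Mathlib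
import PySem

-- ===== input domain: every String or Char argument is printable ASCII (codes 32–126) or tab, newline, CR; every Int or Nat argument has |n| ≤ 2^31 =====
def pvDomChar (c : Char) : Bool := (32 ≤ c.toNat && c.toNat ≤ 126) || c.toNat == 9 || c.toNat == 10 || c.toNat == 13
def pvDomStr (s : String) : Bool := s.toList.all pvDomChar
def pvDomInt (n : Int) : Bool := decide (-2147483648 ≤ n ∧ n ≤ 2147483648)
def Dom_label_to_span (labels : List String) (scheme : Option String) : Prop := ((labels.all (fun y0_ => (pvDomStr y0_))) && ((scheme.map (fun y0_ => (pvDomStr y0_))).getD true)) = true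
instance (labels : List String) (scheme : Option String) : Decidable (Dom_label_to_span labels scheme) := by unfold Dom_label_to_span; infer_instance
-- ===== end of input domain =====

-- B replaces A's nested index-jumping while-loops (with try/except as end-of-run detection) by one
-- flat pass keeping explicit in-span state; same return value on Pre_ (objective: simpler).

-- ===== PORT A =====
-- inner 'while labels[i][0] == "I": i += 1' of the BIO branch: returns (stop index, raised?)
-- (raised = the try/except caught an IndexError: index past the end, or an empty label)
def pvScanBIO (labels : List String) (j : Nat) : Nat × Bool :=
  if h : j < labels.length then
    match PySem.Str.pyGet? labels[j] 0 with
    | none => (j, true)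
    | some c => if c = 'I' then pvScanBIO labels (j + 1) else (j, false)
  else (j, true)
  termination_by labels.length - j

-- inner 'while labels[i][0] != "L": i += 1' of the BILOU branch: returns (stop index, raised?)
def pvScanBILOU (labels : List String) (j : Nat) : Nat × Bool :=
  if h : j < labels.length then
    match PySem.Str.pyGet? labels[j] 0 with
    | none => (j, true)
    | some c => if c = 'L' then (j, false) else pvScanBILOU labels (j + 1)
  else (j, true)
  termination_by labels.length - j

-- A's outer 'while i < len(labels)'; fuel models Python's possible divergence (outside Pre_):
-- on the branches where Python does not advance i (or raises), the port re-enters with less fuel.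
def pvLoopA (labels : List String) (scheme : Option String) (fuel i : Nat)
    (d : PySem.Dict (Int × Int) String) : PySem.Dict (Int × Int) String :=
  match fuel with
  | 0 => d
  | fuel + 1 =>
    if h : i < labels.length then
      let tag := labels[i]
      if tag = "O" then pvLoopA labels scheme fuel (i + 1) d
      else if scheme = some "BIO" then
        if PySem.Str.pyGet? tag 0 = some 'B' then
          let lb := PySem.Str.slice tag (some 2) none
          let s := pvScanBIO labels (i + 1)
          let d' := d.insert ((i : Int), (s.1 : Int)) lb
          pvLoopA labels scheme fuel (if s.2 then s.1 + 1 else s.1) d'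
        else if PySem.Str.pyGet? tag 0 = some 'I' then
          pvLoopA labels scheme fuel (i + 1) d
        else pvLoopA labels scheme fuel i d          -- Python: no branch taken, i unchanged
      else if scheme = some "BILOU" then
        if PySem.Str.pyGet? tag 0 = some 'U' then
          pvLoopA labels scheme fuel (i + 1)
            (d.insert ((i : Int), (i : Int) + 1) (PySem.Str.slice tag (some 2) none))
        else if PySem.Str.pyGet? tag 0 = some 'B' then
          let lb := PySem.Str.slice tag (some 2) none
          let s := pvScanBILOU labels (i + 1)
          let d' := d.insert ((i : Int), (s.1 : Int)) lb
          if s.2 then d'                             -- except IndexError: record then break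
          else pvLoopA labels scheme fuel (s.1 + 1) d'
        else pvLoopA labels scheme fuel (i + 1) d
      else pvLoopA labels scheme fuel i d            -- unreachable under Pre_ (assert raised)
    else d

def label_to_span (labels : List String) (scheme : Option String) : List (Int × Int × String) :=
  (pvLoopA labels scheme (labels.length + 1) 0 PySem.Dict.empty).items.map
    (fun kv => (kv.1.1, kv.1.2, kv.2))

-- ===== PORT B =====
-- B's BIO for-loop: flat pass over indices with state (in_span, start, lb)
def pvLoopBIO (labels : List String) (i : Nat) (inSpan : Bool) (start : Nat) (lb : String)
    (d : PySem.Dict (Int × Int) String) : PySem.Dict (Int × Int) String :=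
  if h : i < labels.length then
    let tag := labels[i]
    let c := PySem.Str.slice tag none (some 1)
    let d1 := if inSpan && !(c == "I") then d.insert ((start : Int), (i : Int)) lb else d
    if c = "B" then pvLoopBIO labels (i + 1) true i (PySem.Str.slice tag (some 2) none) d1
    else pvLoopBIO labels (i + 1) (inSpan && c == "I") start lb d1
  else if inSpan then d.insert ((start : Int), (i : Int)) lb else d
  termination_by labels.length - i

-- B's BILOU for-loop
def pvLoopBILOU (labels : List String) (i : Nat) (inSpan : Bool) (start : Nat) (lb : String)
    (d : PySem.Dict (Int × Int) String) : PySem.Dict (Int × Int) String :=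
  if h : i < labels.length then
    let tag := labels[i]
    let c := PySem.Str.slice tag none (some 1)
    if inSpan then
      if c = "L" then
        pvLoopBILOU labels (i + 1) false start lb (d.insert ((start : Int), (i : Int)) lb)
      else pvLoopBILOU labels (i + 1) true start lb d
    else if c = "U" then
      pvLoopBILOU labels (i + 1) false start lb
        (d.insert ((i : Int), (i : Int) + 1) (PySem.Str.slice tag (some 2) none))
    else if c = "B" then
      pvLoopBILOU labels (i + 1) true i (PySem.Str.slice tag (some 2) none) d
    else pvLoopBILOU labels (i + 1) false start lb d
  else if inSpan then d.insert ((start : Int), (i : Int)) lb else d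
  termination_by labels.length - i

def label_to_span_alt (labels : List String) (scheme : Option String) : List (Int × Int × String) :=
  let d :=
    if scheme = some "BIO" then pvLoopBIO labels 0 false 0 "" PySem.Dict.empty
    else if scheme = some "BILOU" then pvLoopBILOU labels 0 false 0 "" PySem.Dict.empty
    else PySem.Dict.empty                            -- unreachable under Pre_ (assert)
  d.items.map (fun kv => (kv.1.1, kv.1.2, kv.2))

-- ===== PRECONDITION & SPEC =====
-- Pre_ excludes: an invalid scheme (A raises AssertionError); and malformed tag lists — for BIO any
-- tag other than "O"/'B…'/'I…' (A raises IndexError on an empty tag or loops forever otherwise),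
-- for BILOU any empty tag (A raises IndexError, except inside a B-run where the caught IndexError
-- accidentally truncates the span and breaks). On the few such inputs where A still returns, that
-- value is an artefact of the caught IndexError on an empty tag (see cites).
def Pre_label_to_span (labels : List String) (scheme : Option String) : Prop :=
  (scheme = some "BIO" ∧ ∀ l ∈ labels,
      l = "O" ∨ PySem.Str.pyGet? l 0 = some 'B' ∨ PySem.Str.pyGet? l 0 = some 'I') ∨
  (scheme = some "BILOU" ∧ ∀ l ∈ labels, l ≠ "")
instance (labels : List String) (scheme : Option String) : Decidable (Pre_label_to_span labels scheme) := by unfold Pre_label_to_span; infer_instance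

def pvWitness_label_to_span : List String × Option String :=
  (["B-PER", "I-PER", "O", "B-LOC"], some "BIO")

def Spec_label_to_span (labels : List String) (scheme : Option String) (out : List (Int × Int × String)) : Prop := out = label_to_span_alt labels scheme
instance (labels : List String) (scheme : Option String) (out : List (Int × Int × String)) : Decidable (Spec_label_to_span labels scheme out) := by unfold Spec_label_to_span; infer_instance

-- ===== CLAIM (what is proved, stated in full; the proofs are below) =====
def Claim_equal_label_to_span : Prop := ∀ (labels : List String) (scheme : Option String), Dom_label_to_span labels scheme → Pre_label_to_span labels scheme → Spec_label_to_span labels scheme (label_to_span labels scheme)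

-- ===== LEMMAS AND PROOFS =====

-- ---- string bridges ----
theorem pvHead0 (tag : String) : PySem.Str.pyGet? tag 0 = tag.toList[0]? := by
  simp [PySem.List.pyGet?_zero]

theorem pvTake1 (tag : String) :
    (PySem.Str.slice tag none (some 1)).toList = tag.toList.take 1 := by
  simp [PySem.Str.slice, PySem.List.slice_to]

theorem pvC_eq_iff (tag : String) (c0 : Char) (r : List Char) (h : tag.toList = c0 :: r)
    (t : String) : (PySem.Str.slice tag none (some 1) = t) ↔ t.toList = [c0] := by
  rw [String.ext_iff, pvTake1, h]
  simp [eq_comm]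

theorem pvHead_cons (tag : String) (c0 : Char) (r : List Char) (h : tag.toList = c0 :: r) :
    PySem.Str.pyGet? tag 0 = some c0 := by
  rw [pvHead0, h]; rfl

theorem pvHead_exists (tag : String) (c : Char) (h : PySem.Str.pyGet? tag 0 = some c) :
    ∃ r, tag.toList = c :: r := by
  rw [pvHead0] at h
  cases htl : tag.toList with
  | nil => rw [htl] at h; simp at h
  | cons a r => rw [htl] at h; simp at h; exact ⟨r, by rw [h]⟩

-- ---- A-side basics ----
theorem pvLoopA_ge (labels : List String) (scheme : Option String) (fuel i : Nat)
    (d : PySem.Dict (Int × Int) String) (h : labels.length ≤ i) :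
    pvLoopA labels scheme fuel i d = d := by
  cases fuel with
  | zero => rfl
  | succ f => rw [pvLoopA]; rw [dif_neg (by omega)]

-- scan characterizations
theorem pvScanBIO_char (labels : List String) (j : Nat) (hj : j ≤ labels.length) :
    j ≤ (pvScanBIO labels j).1 ∧ (pvScanBIO labels j).1 ≤ labels.length ∧
    (∀ k tg, j ≤ k → k < (pvScanBIO labels j).1 → labels[k]? = some tg →
        PySem.Str.pyGet? tg 0 = some 'I') ∧
    (if (pvScanBIO labels j).2 then
        (pvScanBIO labels j).1 = labels.length ∨
          (∃ tg, labels[(pvScanBIO labels j).1]? = some tg ∧ PySem.Str.pyGet? tg 0 = none)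
      else ∃ tg c, labels[(pvScanBIO labels j).1]? = some tg ∧
          PySem.Str.pyGet? tg 0 = some c ∧ c ≠ 'I') := by
  revert hj
  induction j using pvScanBIO.induct labels with
  | case1 j h hm =>
    intro hj
    rw [pvScanBIO, dif_pos h, hm]
    dsimp only
    refine ⟨le_refl _, by omega, by omega, ?_⟩
    exact Or.inr ⟨labels[j], List.getElem?_eq_getElem h, hm⟩
  | case2 j h hm ih =>
    intro hj
    rw [pvScanBIO, dif_pos h, hm]
    dsimp only
    simp only [if_pos]
    obtain ⟨h1, h2, h3, h4⟩ := ih (by omega)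
    refine ⟨by omega, h2, ?_, h4⟩
    intro k tg hk1 hk2 hk3
    rcases Nat.eq_or_lt_of_le hk1 with rfl | hlt
    · rw [List.getElem?_eq_getElem h] at hk3
      cases hk3; exact hm
    · exact h3 k tg hlt hk2 hk3
  | case3 j h c hm hI =>
    intro hj
    rw [pvScanBIO, dif_pos h, hm]
    dsimp only
    simp only [if_neg hI]
    exact ⟨le_refl _, by omega, by omega,
      ⟨labels[j], c, List.getElem?_eq_getElem h, hm, hI⟩⟩
  | case4 j h =>
    intro hj
    rw [pvScanBIO, dif_neg h]
    exact ⟨le_refl _, hj, by omega, Or.inl (by omega)⟩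

theorem pvScanBILOU_char (labels : List String) (j : Nat) (hj : j ≤ labels.length) :
    j ≤ (pvScanBILOU labels j).1 ∧ (pvScanBILOU labels j).1 ≤ labels.length ∧
    (∀ k tg, j ≤ k → k < (pvScanBILOU labels j).1 → labels[k]? = some tg →
        ∃ c, PySem.Str.pyGet? tg 0 = some c ∧ c ≠ 'L') ∧
    (if (pvScanBILOU labels j).2 then
        (pvScanBILOU labels j).1 = labels.length ∨
          (∃ tg, labels[(pvScanBILOU labels j).1]? = some tg ∧ PySem.Str.pyGet? tg 0 = none)
      else ∃ tg, labels[(pvScanBILOU labels j).1]? = some tg ∧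
          PySem.Str.pyGet? tg 0 = some 'L') := by
  revert hj
  induction j using pvScanBILOU.induct labels with
  | case1 j h hm =>
    intro hj
    rw [pvScanBILOU, dif_pos h, hm]
    dsimp only
    refine ⟨le_refl _, by omega, by omega, ?_⟩
    exact Or.inr ⟨labels[j], List.getElem?_eq_getElem h, hm⟩
  | case2 j h hm =>
    intro hj
    rw [pvScanBILOU, dif_pos h, hm]
    dsimp only
    simp only [if_pos trivial]
    exact ⟨le_refl _, by omega, by omega,
      ⟨labels[j], List.getElem?_eq_getElem h, hm⟩⟩
  | case3 j h c hm hL ih =>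
    intro hj
    rw [pvScanBILOU, dif_pos h, hm]
    dsimp only
    simp only [if_neg hL]
    obtain ⟨h1, h2, h3, h4⟩ := ih (by omega)
    refine ⟨by omega, h2, ?_, h4⟩
    intro k tg hk1 hk2 hk3
    rcases Nat.eq_or_lt_of_le hk1 with rfl | hlt
    · rw [List.getElem?_eq_getElem h] at hk3
      cases hk3; exact ⟨c, hm, hL⟩
    · exact h3 k tg hlt hk2 hk3
  | case4 j h =>
    intro hj
    rw [pvScanBILOU, dif_neg h]
    exact ⟨le_refl _, hj, by omega, Or.inl (by omega)⟩

-- ---- B-side basics ----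
theorem pvLoopBIO_irrel_aux (labels : List String) : ∀ (n i : Nat), labels.length - i = n →
    ∀ (s : Nat) (l : String) (s' : Nat) (l' : String) d,
    pvLoopBIO labels i false s l d = pvLoopBIO labels i false s' l' d := by
  intro n
  induction n with
  | zero =>
    intro i hn s l s' l' d
    rw [pvLoopBIO, pvLoopBIO, dif_neg (by omega), dif_neg (by omega)]
    simp
  | succ n ih =>
    intro i hn s l s' l' d
    by_cases h : i < labels.length
    · rw [pvLoopBIO, pvLoopBIO, dif_pos h, dif_pos h]
      dsimp only
      simp only [Bool.false_and, Bool.false_eq_true, if_false]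
      split
      · rfl
      · exact ih (i + 1) (by omega) s l s' l' d
    · rw [pvLoopBIO, pvLoopBIO, dif_neg h, dif_neg h]
      simp

theorem pvLoopBIO_irrel (labels : List String) (i : Nat) (s : Nat) (l : String)
    (s' : Nat) (l' : String) (d : PySem.Dict (Int × Int) String) :
    pvLoopBIO labels i false s l d = pvLoopBIO labels i false s' l' d :=
  pvLoopBIO_irrel_aux labels _ i rfl s l s' l' d

theorem pvLoopBIO_skipI_aux (labels : List String) : ∀ (n j e st : Nat) (lb : String) d,
    e - j = n → j ≤ e → e ≤ labels.length →
    (∀ k tg, j ≤ k → k < e → labels[k]? = some tg → PySem.Str.pyGet? tg 0 = some 'I') →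
    pvLoopBIO labels j true st lb d = pvLoopBIO labels e true st lb d := by
  intro n
  induction n with
  | zero =>
    intro j e st lb d hn hje he hmid
    have : j = e := by omega
    subst this; rfl
  | succ n ih =>
    intro j e st lb d hn hje he hmid
    have hje' : j < e := by omega
    have h : j < labels.length := by omega
    have hm : PySem.Str.pyGet? labels[j] 0 = some 'I' :=
      hmid j labels[j] (le_refl _) hje' (List.getElem?_eq_getElem h)
    obtain ⟨r, htl⟩ := pvHead_exists _ _ hm
    have hc : PySem.Str.slice labels[j] none (some 1) = "I" :=
      (pvC_eq_iff _ _ _ htl "I").mpr (by decide)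
    conv_lhs => rw [pvLoopBIO, dif_pos h]
    dsimp only
    rw [hc]
    simp only [show (("I" : String) = "B") = False from by simp, if_false,
      show (("I" : String) == "I") = true from by decide, Bool.not_true, Bool.and_false,
      Bool.false_eq_true, Bool.and_true]
    exact ih (j + 1) e st lb d (by omega) (by omega) he
      (fun k tg hk1 hk2 hk3 => hmid k tg (by omega) hk2 hk3)

theorem pvLoopBIO_close (labels : List String) (e st s : Nat) (l lb : String)
    (d : PySem.Dict (Int × Int) String)
    (hne : ∀ tg, labels[e]? = some tg → ¬ PySem.Str.pyGet? tg 0 = some 'I') :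
    pvLoopBIO labels e true st lb d
      = pvLoopBIO labels e false s l (d.insert ((st : Int), (e : Int)) lb) := by
  by_cases h : e < labels.length
  · have hne' := hne _ (List.getElem?_eq_getElem h)
    rw [pvLoopBIO, dif_pos h]
    conv_rhs => rw [pvLoopBIO, dif_pos h]
    dsimp only
    cases htl : labels[e].toList with
    | nil =>
      have hc : PySem.Str.slice labels[e] none (some 1) = "" := by
        rw [String.ext_iff, pvTake1, htl]; rfl
      rw [hc]
      simp only [show (("" : String) = "B") = False from by simp, if_false,
        show (("" : String) == "I") = false from by decide, Bool.not_false, Bool.and_true,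
        Bool.false_and, Bool.false_eq_true, if_true, if_false]
      exact pvLoopBIO_irrel labels (e + 1) st lb s l _
    | cons c0 r =>
      have hcI : ¬ (PySem.Str.slice labels[e] none (some 1) = "I") := by
        rw [pvC_eq_iff _ _ _ htl "I"]
        intro hx
        apply hne'
        rw [pvHead_cons _ _ _ htl]
        simp at hx
        rw [hx]
      have hbeq : (PySem.Str.slice labels[e] none (some 1) == "I") = false :=
        beq_eq_false_iff_ne.mpr hcI
      by_cases hcB : PySem.Str.slice labels[e] none (some 1) = "B"
      · rw [if_pos hcB]
        conv_rhs => rw [if_pos hcB]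
        simp only [hbeq, Bool.not_false, Bool.and_true,
          Bool.false_eq_true, if_true, if_false]
      · rw [if_neg hcB]
        conv_rhs => rw [if_neg hcB]
        simp only [hbeq, Bool.not_false, Bool.and_true, Bool.and_false,
          Bool.false_eq_true, if_true, if_false]
        exact pvLoopBIO_irrel labels (e + 1) st lb s l _
  · rw [pvLoopBIO, dif_neg h]
    conv_rhs => rw [pvLoopBIO, dif_neg h]
    simp

theorem pvLoopBILOU_irrel_aux (labels : List String) : ∀ (n i : Nat), labels.length - i = n →
    ∀ (s : Nat) (l : String) (s' : Nat) (l' : String) d,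
    pvLoopBILOU labels i false s l d = pvLoopBILOU labels i false s' l' d := by
  intro n
  induction n with
  | zero =>
    intro i hn s l s' l' d
    conv_lhs => rw [pvLoopBILOU, dif_neg (by omega)]
    conv_rhs => rw [pvLoopBILOU, dif_neg (by omega)]
    simp
  | succ n ih =>
    intro i hn s l s' l' d
    by_cases h : i < labels.length
    · conv_lhs => rw [pvLoopBILOU, dif_pos h]
      conv_rhs => rw [pvLoopBILOU, dif_pos h]
      dsimp only
      simp only [Bool.false_eq_true, if_false]
      split
      · exact ih (i + 1) (by omega) s l s' l' _
      · split
        · rfl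
        · exact ih (i + 1) (by omega) s l s' l' _
    · conv_lhs => rw [pvLoopBILOU, dif_neg h]
      conv_rhs => rw [pvLoopBILOU, dif_neg h]
      simp

theorem pvLoopBILOU_irrel (labels : List String) (i : Nat) (s : Nat) (l : String)
    (s' : Nat) (l' : String) (d : PySem.Dict (Int × Int) String) :
    pvLoopBILOU labels i false s l d = pvLoopBILOU labels i false s' l' d :=
  pvLoopBILOU_irrel_aux labels _ i rfl s l s' l' d

theorem pvLoopBILOU_skip (labels : List String) : ∀ (n j e st : Nat) (lb : String) d,
    e - j = n → j ≤ e → e ≤ labels.length →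
    (∀ k tg, j ≤ k → k < e → labels[k]? = some tg →
        ∃ c, PySem.Str.pyGet? tg 0 = some c ∧ c ≠ 'L') →
    pvLoopBILOU labels j true st lb d = pvLoopBILOU labels e true st lb d := by
  intro n
  induction n with
  | zero =>
    intro j e st lb d hn hje he hmid
    have : j = e := by omega
    subst this; rfl
  | succ n ih =>
    intro j e st lb d hn hje he hmid
    have hje' : j < e := by omega
    have h : j < labels.length := by omega
    obtain ⟨c0, hm, hcne⟩ :=
      hmid j labels[j] (le_refl _) hje' (List.getElem?_eq_getElem h)
    obtain ⟨r, htl⟩ := pvHead_exists _ _ hm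
    have hcL : ¬ (PySem.Str.slice labels[j] none (some 1) = "L") := by
      rw [pvC_eq_iff _ _ _ htl "L"]
      intro hx
      simp at hx
      exact hcne hx.symm
    conv_lhs => rw [pvLoopBILOU, dif_pos h]
    dsimp only
    rw [if_pos rfl, if_neg hcL]
    exact ih (j + 1) e st lb d (by omega) (by omega) he
      (fun k tg hk1 hk2 hk3 => hmid k tg (by omega) hk2 hk3)

-- ---- main inductions ----
theorem pvPreBIO_no_none (labels : List String)
    (hpre : ∀ l ∈ labels, l = "O" ∨ PySem.Str.pyGet? l 0 = some 'B' ∨ PySem.Str.pyGet? l 0 = some 'I')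
    (tg : String) (htg : tg ∈ labels) : ¬ PySem.Str.pyGet? tg 0 = none := by
  rcases hpre tg htg with h | h | h
  · subst h; decide
  · rw [h]; intro hx; cases hx
  · rw [h]; intro hx; cases hx

theorem pvMainBIO (labels : List String)
    (hpre : ∀ l ∈ labels, l = "O" ∨ PySem.Str.pyGet? l 0 = some 'B' ∨ PySem.Str.pyGet? l 0 = some 'I') :
    ∀ (fuel : Nat), ∀ (i s : Nat) (l : String) d, labels.length + 1 ≤ fuel + i →
    pvLoopA labels (some "BIO") fuel i d = pvLoopBIO labels i false s l d := by
  intro fuel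
  induction fuel with
  | zero =>
    intro i s l d hf
    conv_rhs => rw [pvLoopBIO, dif_neg (by omega)]
    simp [pvLoopA]
  | succ f ih =>
    intro i s l d hf
    by_cases h : i < labels.length
    · have hmem : labels[i] ∈ labels := List.getElem_mem h
      rw [pvLoopA, dif_pos h]
      dsimp only
      rcases hpre _ hmem with hO | hB | hI
      · -- tag = "O": both sides skip
        rw [if_pos hO]
        have hc : PySem.Str.slice labels[i] none (some 1) = "O" :=
          (pvC_eq_iff _ 'O' [] (by rw [hO]; decide) "O").mpr (by decide)
        conv_rhs => rw [pvLoopBIO, dif_pos h]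
        simp only [hc, show (("O" : String) = "B") = False from by simp, if_false,
          show (("O" : String) == "I") = false from by decide,
          Bool.and_false, Bool.false_and, Bool.false_eq_true]
        exact ih (i + 1) s l d (by omega)
      · -- tag starts with 'B': scan the I-run
        obtain ⟨r, htl⟩ := pvHead_exists _ _ hB
        have hneO : ¬ labels[i] = "O" := by
          intro heq; rw [heq] at hB; exact absurd hB (by decide)
        rw [if_neg hneO, if_pos rfl, if_pos hB]
        have hcB : PySem.Str.slice labels[i] none (some 1) = "B" :=
          (pvC_eq_iff _ _ _ htl "B").mpr (by decide)
        conv_rhs => rw [pvLoopBIO, dif_pos h]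
        simp only [hcB, Bool.false_and, Bool.false_eq_true, if_false]
        obtain ⟨h1, h2, h3, h4⟩ := pvScanBIO_char labels (i + 1) (by omega)
        rw [pvLoopBIO_skipI_aux labels _ (i + 1) (pvScanBIO labels (i + 1)).1 i
          (PySem.Str.slice labels[i] (some 2) none) d rfl h1 h2 h3]
        cases hr : (pvScanBIO labels (i + 1)).2 with
        | true =>
          rw [hr] at h4
          have he : (pvScanBIO labels (i + 1)).1 = labels.length := by
            rcases h4 with he | ⟨tg, hget, hnone⟩
            · exact he
            · exact absurd hnone (pvPreBIO_no_none labels hpre tg (List.mem_of_getElem? hget))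
          simp only [reduceIte]
          rw [pvLoopA_ge _ _ _ _ _ (by omega)]
          conv_rhs => rw [pvLoopBIO, dif_neg (by rw [he]; omega)]
          rw [he]
          simp
        | false =>
          rw [hr] at h4
          obtain ⟨tg, c', hget, hc', hcne⟩ := h4
          simp only [reduceIte]
          have hne : ∀ tg', labels[(pvScanBIO labels (i + 1)).1]? = some tg' →
              ¬ PySem.Str.pyGet? tg' 0 = some 'I' := by
            intro tg' hget'
            rw [hget] at hget'
            cases hget'
            rw [hc']
            intro hx
            cases hx
            exact hcne rfl
          rw [pvLoopBIO_close labels _ i s l _ d hne]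
          exact ih (pvScanBIO labels (i + 1)).1 s l _ (by omega)
      · -- tag starts with 'I': both sides skip
        obtain ⟨r, htl⟩ := pvHead_exists _ _ hI
        have hneO : ¬ labels[i] = "O" := by
          intro heq; rw [heq] at hI; exact absurd hI (by decide)
        have hneB : ¬ PySem.Str.pyGet? labels[i] 0 = some 'B' := by
          rw [hI]; intro hx; cases hx
        rw [if_neg hneO, if_pos rfl, if_neg hneB, if_pos hI]
        have hc : PySem.Str.slice labels[i] none (some 1) = "I" :=
          (pvC_eq_iff _ _ _ htl "I").mpr (by decide)
        conv_rhs => rw [pvLoopBIO, dif_pos h]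
        simp only [hc, show (("I" : String) = "B") = False from by simp, if_false,
          Bool.false_and, Bool.false_eq_true]
        exact ih (i + 1) s l d (by omega)
    · rw [pvLoopA_ge _ _ _ _ _ (by omega)]
      conv_rhs => rw [pvLoopBIO, dif_neg h]
      simp

theorem pvStr_ne_empty_toList (tg : String) (h : tg ≠ "") : tg.toList ≠ [] := by
  intro hx
  exact h (String.ext_iff.mpr (by rw [hx]; rfl))

theorem pvMainBILOU (labels : List String) (hpre : ∀ l ∈ labels, l ≠ "") :
    ∀ (fuel : Nat), ∀ (i s : Nat) (l : String) d, labels.length + 1 ≤ fuel + i →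
    pvLoopA labels (some "BILOU") fuel i d = pvLoopBILOU labels i false s l d := by
  intro fuel
  induction fuel with
  | zero =>
    intro i s l d hf
    conv_rhs => rw [pvLoopBILOU, dif_neg (by omega)]
    simp [pvLoopA]
  | succ f ih =>
    intro i s l d hf
    by_cases h : i < labels.length
    · have hmem : labels[i] ∈ labels := List.getElem_mem h
      have hne := hpre _ hmem
      cases htl : labels[i].toList with
      | nil => exact absurd htl (pvStr_ne_empty_toList _ hne)
      | cons c0 r =>
      have hm : PySem.Str.pyGet? labels[i] 0 = some c0 := pvHead_cons _ _ _ htl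
      rw [pvLoopA, dif_pos h]
      dsimp only
      by_cases hO : labels[i] = "O"
      · rw [if_pos hO]
        have hc : PySem.Str.slice labels[i] none (some 1) = "O" :=
          (pvC_eq_iff _ _ _ htl "O").mpr (by
            rw [hO] at htl; cases htl; decide)
        conv_rhs => rw [pvLoopBILOU, dif_pos h]
        simp only [hc, Bool.false_eq_true, if_false,
          show (("O" : String) = "U") = False from by simp,
          show (("O" : String) = "B") = False from by simp]
        exact ih (i + 1) s l d (by omega)
      · rw [if_neg hO, if_neg (by decide), if_pos rfl]
        have hcv : PySem.Str.slice labels[i] none (some 1) = String.ofList [c0] := by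
          rw [pvC_eq_iff _ _ _ htl]
          simp
        by_cases hU : PySem.Str.pyGet? labels[i] 0 = some 'U'
        · have hc0 : c0 = 'U' := by rw [hm] at hU; cases hU; rfl
          subst hc0
          rw [if_pos hU]
          have hc : PySem.Str.slice labels[i] none (some 1) = "U" := hcv.trans (by decide)
          conv_rhs => rw [pvLoopBILOU, dif_pos h]
          simp only [hc, Bool.false_eq_true, if_false, reduceIte]
          exact ih (i + 1) s l _ (by omega)
        · rw [if_neg hU]
          by_cases hB : PySem.Str.pyGet? labels[i] 0 = some 'B'
          · have hc0 : c0 = 'B' := by rw [hm] at hB; cases hB; rfl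
            subst hc0
            rw [if_pos hB]
            have hc : PySem.Str.slice labels[i] none (some 1) = "B" := hcv.trans (by decide)
            conv_rhs => rw [pvLoopBILOU, dif_pos h]
            simp only [hc, Bool.false_eq_true, if_false,
              show (("B" : String) = "U") = False from by simp, reduceIte]
            obtain ⟨h1, h2, h3, h4⟩ := pvScanBILOU_char labels (i + 1) (by omega)
            rw [pvLoopBILOU_skip labels _ (i + 1) (pvScanBILOU labels (i + 1)).1 i
              (PySem.Str.slice labels[i] (some 2) none) d rfl h1 h2 h3]
            cases hr : (pvScanBILOU labels (i + 1)).2 with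
            | true =>
              rw [hr] at h4
              have he : (pvScanBILOU labels (i + 1)).1 = labels.length := by
                rcases h4 with he | ⟨tg, hget, hnone⟩
                · exact he
                · have : tg ≠ "" := hpre tg (List.mem_of_getElem? hget)
                  rw [pvHead0] at hnone
                  cases htg : tg.toList with
                  | nil => exact absurd htg (pvStr_ne_empty_toList _ this)
                  | cons a as => rw [htg] at hnone; exact absurd hnone (by simp)
              simp only [reduceIte]
              conv_rhs => rw [pvLoopBILOU, dif_neg (by rw [he]; omega)]
              rw [he]
              simp
            | false =>
              rw [hr] at h4
              obtain ⟨tg, hget, hcL'⟩ := h4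
              obtain ⟨he, htg⟩ := List.getElem?_eq_some_iff.mp hget
              simp only [Bool.false_eq_true, if_false]
              conv_rhs => rw [pvLoopBILOU, dif_pos he]
              have hcL : PySem.Str.slice labels[(pvScanBILOU labels (i + 1)).1] none (some 1)
                  = "L" := by
                obtain ⟨rr, htlL⟩ := pvHead_exists _ _ (htg ▸ hcL')
                exact (pvC_eq_iff _ _ _ htlL "L").mpr (by decide)
              simp only [hcL, reduceIte]
              rw [ih ((pvScanBILOU labels (i + 1)).1 + 1) s l _ (by omega)]
              exact pvLoopBILOU_irrel labels _ s l i _ _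
          · rw [if_neg hB]
            have hcU : ¬ PySem.Str.slice labels[i] none (some 1) = "U" := by
              rw [hcv]
              intro hx
              apply hU
              rw [hm]
              have : c0 = 'U' := by
                have := String.ext_iff.mp hx
                simpa using this
              rw [this]
            have hcB : ¬ PySem.Str.slice labels[i] none (some 1) = "B" := by
              rw [hcv]
              intro hx
              apply hB
              rw [hm]
              have : c0 = 'B' := by
                have := String.ext_iff.mp hx
                simpa using this
              rw [this]
            conv_rhs => rw [pvLoopBILOU, dif_pos h]
            simp only [Bool.false_eq_true, if_false, if_neg hcU, if_neg hcB]
            exact ih (i + 1) s l d (by omega)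
    · rw [pvLoopA_ge _ _ _ _ _ (by omega)]
      conv_rhs => rw [pvLoopBILOU, dif_neg h]
      simp


-- ===== VERDICT (by name: the statement is the Claim_ definition above) =====
theorem label_to_span_spec : Claim_equal_label_to_span := by
  intro labels scheme _ hpre
  unfold Spec_label_to_span label_to_span label_to_span_alt
  rcases hpre with ⟨hs, hl⟩ | ⟨hs, hl⟩ <;> subst hs
  · rw [if_pos rfl, pvMainBIO labels hl (labels.length + 1) 0 0 "" PySem.Dict.empty (by omega)]
  · rw [if_neg (by decide), if_pos rfl,
      pvMainBILOU labels hl (labels.length + 1) 0 0 "" PySem.Dict.empty (by omega)]
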